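-- pv_equiv track=rewrite | github.com/raphey/advent-of-code-2021 | 20.py | get_same_id_guide
-- ===== SOURCE A (Python) =====
-- def get_same_id_guide(tiles):
--     guide = []
--     for i, t in enumerate(tiles):
--         matches = []
--         for j, u in enumerate(tiles):
--             if t[0] == u[0]:
--                 matches.append(j)
--         guide.append(matches)
--     return guide
-- ===== SOURCE B (Python) =====
-- def get_same_id_guide(tiles):
--     groups = {}
--     for j, u in enumerate(tiles):
--         groups.setdefault(u[0], []).append(j)
--     return [groups[t[0]] for t in tiles]
-- ===== Notes on version B (the rewrite author's own statement) =====
-- stated objective: faster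
-- what changed: Replaced the nested quadratic scan (for each tile, re-scan all tiles for equal ids) by one pass that groups indices by id in a dict, then one lookup per tile.
import Mathlib
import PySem

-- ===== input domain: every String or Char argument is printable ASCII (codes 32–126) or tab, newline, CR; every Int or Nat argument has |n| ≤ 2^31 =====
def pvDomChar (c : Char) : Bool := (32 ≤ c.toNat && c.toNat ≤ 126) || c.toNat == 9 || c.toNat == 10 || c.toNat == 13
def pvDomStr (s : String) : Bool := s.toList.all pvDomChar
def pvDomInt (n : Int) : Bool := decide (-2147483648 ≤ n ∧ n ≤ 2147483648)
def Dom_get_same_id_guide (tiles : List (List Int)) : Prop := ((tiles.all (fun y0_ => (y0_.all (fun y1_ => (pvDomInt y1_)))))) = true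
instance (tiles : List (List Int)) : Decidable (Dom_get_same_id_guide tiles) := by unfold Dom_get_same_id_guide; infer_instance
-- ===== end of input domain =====

-- B replaces A's quadratic nested scan by a one-pass dict grouping indices by tile id, then one lookup per tile (asymptotically faster).

-- ===== PORT A =====
def get_same_id_guide (tiles : List (List Int)) : List (List Int) :=
  (PySem.List.enumerate tiles).foldl (fun guide it =>
    guide ++ [(PySem.List.enumerate tiles).foldl (fun ms ju =>
      if PySem.List.pyGet? it.2 0 == PySem.List.pyGet? ju.2 0 then ms ++ [ju.1]
      else ms) []]) []

-- ===== PORT B =====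
-- groups = {}; for j, u in enumerate(tiles): groups.setdefault(u[0], []).append(j)
def pvGroups (tiles : List (List Int)) : PySem.Dict (Option Int) (List Int) :=
  (PySem.List.enumerate tiles).foldl
    (fun d ju => d.modify (PySem.List.pyGet? ju.2 0) [] (· ++ [ju.1])) PySem.Dict.empty

def get_same_id_guide_alt (tiles : List (List Int)) : List (List Int) :=
  tiles.map (fun t => (pvGroups tiles).getD (PySem.List.pyGet? t 0) [])

-- ===== PRECONDITION & SPEC =====
-- Pre_ excludes tiles containing an empty list: there t[0] raises IndexError in both Pythons.
def Pre_get_same_id_guide (tiles : List (List Int)) : Prop := ∀ t ∈ tiles, t ≠ []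
instance (tiles : List (List Int)) : Decidable (Pre_get_same_id_guide tiles) := by unfold Pre_get_same_id_guide; infer_instance
def pvWitness_get_same_id_guide : List (List Int) := [[1, 5], [2], [1, 7]]

def Spec_get_same_id_guide (tiles : List (List Int)) (out : List (List Int)) : Prop := out = get_same_id_guide_alt tiles
instance (tiles : List (List Int)) (out : List (List Int)) : Decidable (Spec_get_same_id_guide tiles out) := by unfold Spec_get_same_id_guide; infer_instance

-- ===== CLAIM (what is proved, stated in full; the proofs are below) =====
def Claim_equal_get_same_id_guide : Prop := ∀ (tiles : List (List Int)), Dom_get_same_id_guide tiles → Pre_get_same_id_guide tiles → Spec_get_same_id_guide tiles (get_same_id_guide tiles)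

-- ===== LEMMAS AND PROOFS =====

-- B's dict entry at key k is exactly the filtered index list A collects for that id.
theorem pvGroups_getD (tiles : List (List Int)) (k : Option Int) :
    (pvGroups tiles).getD k [] =
      ((PySem.List.enumerate tiles).filter
        (fun ju => PySem.List.pyGet? ju.2 0 == k)).map (·.1) := by
  have h := PySem.Dict.getD_foldl_modify_append
    (l := (PySem.List.enumerate tiles).map (fun ju => (PySem.List.pyGet? ju.2 0, ju.1)))
    (d := (PySem.Dict.empty : PySem.Dict (Option Int) (List Int))) (c := k)
  simpa [pvGroups, List.foldl_map, List.filter_map, Function.comp_def] using h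

-- ===== VERDICT (by name: the statement is the Claim_ definition above) =====
theorem get_same_id_guide_spec : Claim_equal_get_same_id_guide := by
  intro tiles _ _
  unfold Spec_get_same_id_guide get_same_id_guide get_same_id_guide_alt
  simp only [PySem.List.foldl_append_if, PySem.List.foldl_append_singleton_eq_map,
    List.nil_append, pvGroups_getD]
  -- reduce the map over 'enumerate tiles' to a map over 'tiles'
  calc (PySem.List.enumerate tiles).map
        (fun it => ((PySem.List.enumerate tiles).filter
          (fun ju => PySem.List.pyGet? it.2 0 == PySem.List.pyGet? ju.2 0)).map (·.1))
      = ((PySem.List.enumerate tiles).map (·.2)).map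
        (fun t => ((PySem.List.enumerate tiles).filter
          (fun ju => PySem.List.pyGet? t 0 == PySem.List.pyGet? ju.2 0)).map (·.1)) := by
        rw [List.map_map]; rfl
    _ = tiles.map (fun t => ((PySem.List.enumerate tiles).filter
          (fun ju => PySem.List.pyGet? ju.2 0 == PySem.List.pyGet? t 0)).map (·.1)) := by
        rw [PySem.List.map_snd_enumerate]
        refine List.map_congr_left (fun t _ => ?_)
        congr 1
        refine List.filter_congr (fun ju _ => ?_)
        simp [BEq.comm]
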